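-- pv_equiv track=rewrite | github.com/emilyahn/codemix | src/parse_miami.py | check_spkr
-- ===== SOURCE A (Python) =====
-- def check_spkr(spkrid, total, i):
-- 	if spkrid in ['OSE', 'OSA', 'OSB']:  # skip non-documented speakers
-- 		return None
--
-- 	# this is handled better in ./clean_miami.py
-- 	if spkrid in ['eng_eng', 'spa_spa', 'spa_eng']:  # use previous turn's spkrid
-- 		newid = total[i-1].split()[2]
-- 		if newid in ['OSE', 'OSA', 'OSB', 'eng_eng', 'spa_spa']:
-- 			return check_spkr(newid, total, i-1)
-- 		return newid
-- 	return spkrid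
-- ===== SOURCE B (Python) =====
-- # B: iterative re-implementation - the backtracking recursion becomes a while
-- # loop carrying (spkrid, i) in locals instead of the call stack (objective: simpler).
-- def check_spkr(spkrid, total, i):
-- 	while True:
-- 		if spkrid in ('OSE', 'OSA', 'OSB'):
-- 			return None
-- 		if spkrid not in ('eng_eng', 'spa_spa', 'spa_eng'):
-- 			return spkrid
-- 		newid = total[i-1].split()[2]
-- 		if newid not in ('OSE', 'OSA', 'OSB', 'eng_eng', 'spa_spa'):
-- 			return newid
-- 		spkrid, i = newid, i - 1
-- ===== Notes on version B (the rewrite author's own statement) =====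
-- stated objective: simpler
-- what changed: The self-recursive backtracking over previous turns is replaced by a single while loop that updates the current spkrid and index in local variables, removing the call stack.
import Mathlib
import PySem

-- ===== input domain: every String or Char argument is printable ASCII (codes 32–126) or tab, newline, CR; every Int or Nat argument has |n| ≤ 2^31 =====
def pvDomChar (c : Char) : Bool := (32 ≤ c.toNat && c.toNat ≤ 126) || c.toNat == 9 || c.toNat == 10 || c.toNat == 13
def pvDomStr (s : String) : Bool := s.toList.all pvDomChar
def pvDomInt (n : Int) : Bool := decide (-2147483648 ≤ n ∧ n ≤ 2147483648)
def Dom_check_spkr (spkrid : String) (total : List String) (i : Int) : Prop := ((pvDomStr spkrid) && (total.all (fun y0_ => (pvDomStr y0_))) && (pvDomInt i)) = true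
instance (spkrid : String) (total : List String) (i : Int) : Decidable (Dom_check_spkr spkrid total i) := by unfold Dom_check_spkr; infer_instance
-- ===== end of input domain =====

-- B replaces A's self-recursion (state on the call stack) by a while loop carrying
-- (spkrid, i) in locals.  Equivalence of the return values is proved on Pre_ below.

-- ===== PORT A =====
-- Literal port of A's recursion.  Python's recursion is made total with fuel
-- (the backtracking index strictly decreases, so the depth before Python would
-- raise IndexError is below |i| + len(total) + 1); the raising lookups return
-- none, and Pre_check_spkr excludes exactly the raising inputs.
def check_spkrFuel : Nat → String → List String → Int → Option String
  | 0, _, _, _ => none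
  | n + 1, spkrid, total, i =>
    if spkrid ∈ ["OSE", "OSA", "OSB"] then none
    else if spkrid ∈ ["eng_eng", "spa_spa", "spa_eng"] then
      match PySem.List.pyGet? total (i - 1) with
      | none => none  -- IndexError on total[i-1] (outside Pre_)
      | some line =>
        match PySem.List.pyGet? (PySem.Str.split₀ line) 2 with
        | none => none  -- IndexError on .split()[2] (outside Pre_)
        | some newid =>
          if newid ∈ ["OSE", "OSA", "OSB", "eng_eng", "spa_spa"] then
            check_spkrFuel n newid total (i - 1)
          else some newid
    else some spkrid

def check_spkr (spkrid : String) (total : List String) (i : Int) : Option String :=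
  check_spkrFuel (i.natAbs + total.length + 1) spkrid total i

-- ===== PORT B =====
-- Literal port of Source B's while loop: the loop body over the state (spkrid, i),
-- with the same fuel bound making the loop total.
def check_spkrLoop (total : List String) : Nat → String × Int → Option String
  | 0, _ => none
  | n + 1, (spkrid, i) =>
    if spkrid = "OSE" ∨ spkrid = "OSA" ∨ spkrid = "OSB" then none
    else if ¬ (spkrid = "eng_eng" ∨ spkrid = "spa_spa" ∨ spkrid = "spa_eng") then some spkrid
    else
      match (PySem.List.pyGet? total (i - 1)).bind
              (fun line => PySem.List.pyGet? (PySem.Str.split₀ line) 2) with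
      | none => none  -- total[i-1].split()[2] raises (outside Pre_)
      | some newid =>
        if ¬ (newid = "OSE" ∨ newid = "OSA" ∨ newid = "OSB" ∨
              newid = "eng_eng" ∨ newid = "spa_spa") then some newid
        else check_spkrLoop total n (newid, i - 1)

def check_spkr_alt (spkrid : String) (total : List String) (i : Int) : Option String :=
  check_spkrLoop total (i.natAbs + total.length + 1) (spkrid, i)

-- ===== PRECONDITION & SPEC =====
-- pvReadTok total m = the third whitespace token of total[m] (none = IndexError there).
def pvReadTok (total : List String) (m : Int) : Option String :=
  (PySem.List.pyGet? total m).bind (fun l => PySem.List.pyGet? (PySem.Str.split₀ l) 2)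

-- A token on which the backtracking keeps stepping to an earlier turn.
def pvContTok (t : String) : Bool := t == "eng_eng" || t == "spa_spa"

-- Pre_ excludes exactly the inputs on which A raises IndexError: backtracking
-- chains where every visited previous-turn token keeps the chain going until a
-- lookup steps out of range or hits a line with fewer than three tokens.  On
-- every input Pre_ admits, A returns normally (d below is the number of
-- backtracking steps before the chain reaches a stopping token; every step's
-- lookup must be in range, so d < 2*len(total)+1 bounds all chains exactly).
def Pre_check_spkr (spkrid : String) (total : List String) (i : Int) : Prop :=
  spkrid ∉ ["eng_eng", "spa_spa", "spa_eng"] ∨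
    ∃ d < 2 * total.length + 1,
      (∀ e < d, (pvReadTok total (i - 1 - e)).any pvContTok = true) ∧
      (pvReadTok total (i - 1 - d)).any (fun t => !pvContTok t) = true
instance (spkrid : String) (total : List String) (i : Int) : Decidable (Pre_check_spkr spkrid total i) := by unfold Pre_check_spkr; infer_instance

def pvWitness_check_spkr : String × List String × Int := ("eng_eng", ["a b KAY"], 1)

def Spec_check_spkr (spkrid : String) (total : List String) (i : Int) (out : Option String) : Prop := out = check_spkr_alt spkrid total i
instance (spkrid : String) (total : List String) (i : Int) (out : Option String) : Decidable (Spec_check_spkr spkrid total i out) := by unfold Spec_check_spkr; infer_instance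

-- ===== CLAIM (what is proved, stated in full; the proofs are below) =====
def Claim_equal_check_spkr : Prop := ∀ (spkrid : String) (total : List String) (i : Int), Dom_check_spkr spkrid total i → Pre_check_spkr spkrid total i → Spec_check_spkr spkrid total i (check_spkr spkrid total i)

-- ===== LEMMAS AND PROOFS =====

-- The two fuelled loops coincide for equal fuel on EVERY input (so equivalence does
-- not even need Pre_, which only delimits where A returns normally).
theorem loop_eq_fuel (n : Nat) : ∀ (spkrid : String) (total : List String) (i : Int),
    check_spkrFuel n spkrid total i = check_spkrLoop total n (spkrid, i) := by
  induction n with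
  | zero => intro spkrid total i; rfl
  | succ n ih =>
    intro spkrid total i
    simp only [check_spkrFuel, check_spkrLoop, List.mem_cons, List.not_mem_nil, or_false]
    by_cases h1 : spkrid = "OSE" ∨ spkrid = "OSA" ∨ spkrid = "OSB"
    · simp [h1]
    · simp only [h1, if_false]
      by_cases h2 : spkrid = "eng_eng" ∨ spkrid = "spa_spa" ∨ spkrid = "spa_eng"
      · simp only [h2, if_true, not_true, if_false]
        cases hget : PySem.List.pyGet? total (i - 1) with
        | none => simp
        | some line =>
          simp only [show ((some line).bind
              (fun line => PySem.List.pyGet? (PySem.Str.split₀ line) 2))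
              = PySem.List.pyGet? (PySem.Str.split₀ line) 2 from rfl]
          cases htok : PySem.List.pyGet? (PySem.Str.split₀ line) 2 with
          | none => simp
          | some newid =>
            by_cases h3 : newid = "OSE" ∨ newid = "OSA" ∨ newid = "OSB" ∨
                newid = "eng_eng" ∨ newid = "spa_spa"
            · simp only [h3, if_true, not_or] at *
              simp [ih newid total (i - 1)]
            · simp [h3]
      · simp [h2]

theorem ports_eq (spkrid : String) (total : List String) (i : Int) :
    check_spkr spkrid total i = check_spkr_alt spkrid total i := by
  unfold check_spkr check_spkr_alt
  exact loop_eq_fuel _ spkrid total i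

-- ===== VERDICT (by name: the statement is the Claim_ definition above) =====
theorem check_spkr_spec : Claim_equal_check_spkr := by
  intro spkrid total i _ _
  exact ports_eq spkrid total i
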